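-- pv_equiv track=rewrite | github.com/BestPhanuwish/COMP3308-A1 | task6/program.py | generate_child
-- ===== SOURCE A (Python) =====
-- def generate_child(char_list: list) -> list:
--     pairs = []
--     char_list = list(char_list)
--     char_list.sort()
--     for i in range(len(char_list)):
--         for j in range(i + 1, len(char_list)):
--             if char_list[i] == char_list[j]:
--                 continue
--             pair = [char_list[i], char_list[j]]
--             pairs.append(pair)
--     return pairs
-- ===== SOURCE B (Python) =====
-- def generate_child(char_list: list) -> list:
--     # group the sorted list into runs of equal values: [(value, count), ...]
--     groups = []
--     run = []  # current run of equal values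
--     for x in sorted(char_list):
--         if run and run[0] == x:
--             run.append(x)
--         else:
--             if run:
--                 groups.append((run[0], len(run)))
--             run = [x]
--     if run:
--         groups.append((run[0], len(run)))
--     # each of the c occurrences of the front value pairs with every element of
--     # every later group, then continue with the later groups
--     pairs = []
--     while groups:
--         (v, c) = groups.pop(0)
--         block = [[v, w] for (w, d) in groups for _ in range(d)]
--         pairs += block * c
--     return pairs
-- ===== Notes on version B (the rewrite author's own statement) =====
-- stated objective: alternative
-- what changed: Replaces the O(n^2) index double-loop with equality tests by a run-length encoding of the sorted list into (value,count) groups, then emits each cross-group block of pairs with replication counts; no per-element equality skipping remains.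
import Mathlib
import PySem

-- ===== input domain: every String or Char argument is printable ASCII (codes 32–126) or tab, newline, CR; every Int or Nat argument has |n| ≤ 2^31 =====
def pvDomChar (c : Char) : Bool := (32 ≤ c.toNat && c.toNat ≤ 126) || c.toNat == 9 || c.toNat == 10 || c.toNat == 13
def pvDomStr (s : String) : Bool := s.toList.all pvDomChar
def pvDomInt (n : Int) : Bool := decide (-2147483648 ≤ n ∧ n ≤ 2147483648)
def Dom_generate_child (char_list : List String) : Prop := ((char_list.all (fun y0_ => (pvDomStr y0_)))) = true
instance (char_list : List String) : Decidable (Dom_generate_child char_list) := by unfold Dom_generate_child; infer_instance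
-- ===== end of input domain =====

-- B replaces A's index double-loop (skipping equal pairs element by element) with a
-- run-length encoding of the sorted list and replicated cross-group pair blocks (alternative).

-- ===== PORT A =====
def generate_child (char_list : List String) : List (List String) :=
  let s := PySem.List.sorted char_list (fun x => x) false
  (PySem.List.pyRange 0 (PySem.List.len s) 1).foldl (fun pairs i =>
    (PySem.List.pyRange (i + 1) (PySem.List.len s) 1).foldl (fun pairs j =>
      if PySem.List.pyGetD s i "" = PySem.List.pyGetD s j "" then pairs
      else pairs ++ [[PySem.List.pyGetD s i "", PySem.List.pyGetD s j ""]]) pairs) []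

-- ===== PORT B =====
-- Source B's grouping loop body: extend the current run of equal values or flush it
def pvStep (st : List (String × Nat) × List String) (x : String) :
    List (String × Nat) × List String :=
  match st with
  | (gs, run) =>
    match run with
    | r :: _ => if r = x then (gs, run ++ [x]) else (gs ++ [(r, run.length)], [x])
    | [] => (gs, [x])

-- the trailing 'if run: groups.append((run[0], len(run)))'
def pvFinish (st : List (String × Nat) × List String) : List (String × Nat) :=
  match st with
  | (gs, r :: run) => gs ++ [(r, (r :: run).length)]
  | (gs, []) => gs

def pvGroupsB (s : List String) : List (String × Nat) :=
  pvFinish (s.foldl pvStep ([], []))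

-- Source B's block comprehension: [[v, w] for (w, d) in gs for _ in range(d)]
def pvBlock (v : String) (gs : List (String × Nat)) : List (List String) :=
  gs.flatMap (fun g => List.replicate g.2 [v, g.1])

-- Source B's while loop: pop the front group, emit block * c, continue on the rest
def pvExpand : List (String × Nat) → List (List String)
  | [] => []
  | (v, c) :: rest => (List.replicate c (pvBlock v rest)).flatten ++ pvExpand rest

def generate_child_alt (char_list : List String) : List (List String) :=
  pvExpand (pvGroupsB (PySem.List.sorted char_list (fun x => x) false))

-- ===== PRECONDITION & SPEC =====
def Spec_generate_child (char_list : List String) (out : List (List String)) : Prop := out = generate_child_alt char_list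
instance (char_list : List String) (out : List (List String)) : Decidable (Spec_generate_child char_list out) := by unfold Spec_generate_child; infer_instance

-- ===== CLAIM (what is proved, stated in full; the proofs are below) =====
def Claim_equal_generate_child : Prop := ∀ (char_list : List String), Dom_generate_child char_list → Spec_generate_child char_list (generate_child char_list)

-- ===== LEMMAS AND PROOFS =====

-- A's result on the sorted list s, characterised structurally: each head pairs with
-- every later element of a different value, in order.
def pvF : List String → List (List String)
  | [] => []
  | x :: xs => (xs.filter (fun y => !(x == y))).map (fun y => [x, y]) ++ pvF xs

-- the multiset of values an rle group list stands for
def pvVals (gs : List (String × Nat)) : List String := gs.flatMap (fun g => List.replicate g.2 g.1)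

lemma pvF_skip_foldl (x : String) (l : List String) (acc : List (List String)) :
    l.foldl (fun pairs y => if x = y then pairs else pairs ++ [[x, y]]) acc
      = acc ++ (l.filter (fun y => !(x == y))).map (fun y => [x, y]) := by
  induction l generalizing acc with
  | nil => simp
  | cons y t ih =>
    simp only [List.foldl_cons, List.filter_cons]
    by_cases h : x = y
    · subst h; simp [ih]
    · simp [h, ih]

-- what one iteration of A's outer loop appends, as a function of the index
def pvG (s : List String) (i : Int) : List (List String) :=
  ((s.drop (i + 1).toNat).filter (fun y => !(PySem.List.pyGetD s i "" == y))).map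
    (fun y => [PySem.List.pyGetD s i "", y])

lemma pvG_cons (x : String) (t : List String) (k : Nat) :
    pvG (x :: t) ((k : Int) + 1) = pvG t ((k : Int)) := by
  unfold pvG
  have h1 : ((k : Int) + 1 + 1).toNat = k + 2 := by omega
  have h2 : ((k : Int) + 1).toNat = k + 1 := by omega
  have h3 : ((k : Int) + 1) = ((k + 1 : Nat) : Int) := by push_cast; ring
  rw [h1, h2, h3, PySem.List.pyGetD_natCast, PySem.List.pyGetD_natCast]
  simp

lemma pvShift (x : String) (t : List String) (n : Nat) :
    (PySem.List.pyRange 1 ((n : Int) + 1) 1).flatMap (pvG (x :: t))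
      = (PySem.List.pyRange 0 (n : Int) 1).flatMap (pvG t) := by
  induction n with
  | zero =>
    rw [PySem.List.pyRange_one_eq_nil (by omega), PySem.List.pyRange_one_eq_nil (by omega)]
    simp
  | succ m ih =>
    rw [show ((m + 1 : Nat) : Int) = (m : Int) + 1 from by push_cast; ring]
    conv_lhs => rw [PySem.List.pyRange_one_succ_right (show (1 : Int) ≤ (m : Int) + 1 by omega)]
    conv_rhs => rw [PySem.List.pyRange_one_succ_right (show (0 : Int) ≤ (m : Int) by omega)]
    rw [List.flatMap_append, List.flatMap_append, ih]
    simp [pvG_cons x t m]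

lemma pvFlat (s : List String) :
    (PySem.List.pyRange 0 (PySem.List.len s) 1).flatMap (pvG s) = pvF s := by
  induction s with
  | nil => simp [PySem.List.pyRange_one_eq_nil, pvF]
  | cons x t ih =>
    have hlen : PySem.List.len (x :: t) = (t.length : Int) + 1 := by
      simp [PySem.List.len_eq]
    have hlent : PySem.List.len t = (t.length : Int) := by simp [PySem.List.len_eq]
    rw [hlen, PySem.List.pyRange_one_cons (by omega), List.flatMap_cons,
      show (0 : Int) + 1 = 1 from rfl, pvShift x t t.length, ← hlent, ih]
    have hG0 : pvG (x :: t) 0 = (t.filter (fun y => !(x == y))).map (fun y => [x, y]) := by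
      unfold pvG
      simp [PySem.List.pyGetD_zero_cons]
    rw [hG0]
    rfl

lemma pvA_eq_pvF (s : List String) :
    (PySem.List.pyRange 0 (PySem.List.len s) 1).foldl (fun pairs i =>
      (PySem.List.pyRange (i + 1) (PySem.List.len s) 1).foldl (fun pairs j =>
        if PySem.List.pyGetD s i "" = PySem.List.pyGetD s j "" then pairs
        else pairs ++ [[PySem.List.pyGetD s i "", PySem.List.pyGetD s j ""]]) pairs) []
      = pvF s := by
  have hcongr : ∀ (pairs : List (List String)) (i : Int),
      i ∈ PySem.List.pyRange 0 (PySem.List.len s) 1 →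
      (PySem.List.pyRange (i + 1) (PySem.List.len s) 1).foldl (fun pairs j =>
        if PySem.List.pyGetD s i "" = PySem.List.pyGetD s j "" then pairs
        else pairs ++ [[PySem.List.pyGetD s i "", PySem.List.pyGetD s j ""]]) pairs
        = pairs ++ pvG s i := by
    intro pairs i hi
    have h0 : (0 : Int) ≤ i + 1 := by
      have := (PySem.List.mem_pyRange_one.mp hi).1
      omega
    rw [PySem.List.foldl_pyRange_pyGetD s ""
      (fun acc y => if PySem.List.pyGetD s i "" = y then acc
        else acc ++ [[PySem.List.pyGetD s i "", y]]) pairs h0,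
      pvF_skip_foldl]
    unfold pvG
    rfl
  calc _ = (PySem.List.pyRange 0 (PySem.List.len s) 1).foldl
        (fun pairs i => pairs ++ pvG s i) [] := PySem.List.foldl_congr_mem _ _ _ _ hcongr
    _ = [] ++ (PySem.List.pyRange 0 (PySem.List.len s) 1).flatMap (pvG s) := by
        rw [PySem.List.foldl_append_eq_flatMap]
    _ = pvF s := by rw [List.nil_append]; exact pvFlat s

-- head-recursive run-length encoding (proof-side reference form of B's grouping loop)
def pvGroups : List String → List (String × Nat)
  | [] => []
  | x :: xs =>
    match pvGroups xs with
    | (v, c) :: rest => if v = x then (x, c + 1) :: rest else (x, 1) :: (v, c) :: rest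
    | [] => [(x, 1)]

lemma pvGroups_cons_eq (x : String) (t : List String) (v : String) (c : Nat)
    (rest : List (String × Nat)) (h : pvGroups t = (v, c) :: rest) :
    pvGroups (x :: t) = if v = x then (x, c + 1) :: rest else (x, 1) :: (v, c) :: rest := by
  simp only [pvGroups]; rw [h]

-- merge a run of c copies of v onto the front of a group list
def pvMerge (v : String) (c : Nat) : List (String × Nat) → List (String × Nat)
  | (w, d) :: rest => if w = v then (v, d + c) :: rest else (v, c) :: (w, d) :: rest
  | [] => [(v, c)]

lemma pvGroups_cons_merge (x : String) (xs : List String) :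
    pvGroups (x :: xs) = pvMerge x 1 (pvGroups xs) := by
  cases h : pvGroups xs with
  | nil => simp only [pvGroups, pvMerge]; rw [h]
  | cons g rest =>
    obtain ⟨v, c⟩ := g
    by_cases hv : v = x
    · rw [pvGroups_cons_eq x xs v c rest h, if_pos hv, pvMerge, if_pos hv]
    · rw [pvGroups_cons_eq x xs v c rest h, if_neg hv, pvMerge, if_neg hv]

lemma pvMerge_merge (v : String) (a b : Nat) (gs : List (String × Nat)) :
    pvMerge v a (pvMerge v b gs) = pvMerge v (b + a) gs := by
  cases gs with
  | nil => simp [pvMerge]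
  | cons g rest =>
    obtain ⟨w, d⟩ := g
    by_cases hw : w = v
    · simp [pvMerge, hw, Nat.add_assoc]
    · simp [pvMerge, hw]

lemma pvGroups_head (x : String) (t : List String) :
    ∃ c rest, pvGroups (x :: t) = (x, c) :: rest := by
  cases h : pvGroups t with
  | nil => exact ⟨1, [], by simp only [pvGroups]; rw [h]⟩
  | cons g rest =>
    obtain ⟨v, c⟩ := g
    by_cases hv : v = x
    · exact ⟨c + 1, rest, by rw [pvGroups_cons_eq x t v c rest h, if_pos hv]⟩
    · exact ⟨1, (v, c) :: rest, by rw [pvGroups_cons_eq x t v c rest h, if_neg hv]⟩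

lemma pvGroupsB_inv (xs : List String) : ∀ (gs : List (String × Nat)) (r : String) (run : List String),
    pvFinish (xs.foldl pvStep (gs, r :: run)) = gs ++ pvMerge r (run.length + 1) (pvGroups xs) := by
  induction xs with
  | nil =>
    intro gs r run
    simp [pvFinish, pvGroups, pvMerge]
  | cons x xs ih =>
    intro gs r run
    rw [List.foldl_cons]
    by_cases hr : r = x
    · have hstep : pvStep (gs, r :: run) x = (gs, r :: (run ++ [x])) := by
        simp [pvStep, hr]
      rw [hstep, ih gs r (run ++ [x])]
      rw [pvGroups_cons_merge, ← hr, pvMerge_merge]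
      simp [Nat.add_comm]
    · have hstep : pvStep (gs, r :: run) x = (gs ++ [(r, run.length + 1)], [x]) := by
        simp [pvStep, hr]
      rw [hstep, ih (gs ++ [(r, run.length + 1)]) x []]
      simp only [List.length_nil, Nat.zero_add]
      obtain ⟨c0, rest0, hg0⟩ := pvGroups_head x xs
      rw [← pvGroups_cons_merge, hg0]
      have : pvMerge r (run.length + 1) ((x, c0) :: rest0)
          = (r, run.length + 1) :: (x, c0) :: rest0 := by
        have hxr : ¬ x = r := fun h => hr h.symm
        simp [pvMerge, hxr]
      rw [this]
      simp

lemma pvGroupsB_eq (s : List String) : pvGroupsB s = pvGroups s := by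
  cases s with
  | nil => simp [pvGroupsB, pvFinish, pvGroups]
  | cons x xs =>
    unfold pvGroupsB
    rw [List.foldl_cons]
    have hstep : pvStep ([], []) x = ([], [x]) := by simp [pvStep]
    rw [hstep, pvGroupsB_inv xs [] x [], pvGroups_cons_merge]
    simp

lemma pvVals_groups (s : List String) : pvVals (pvGroups s) = s := by
  induction s with
  | nil => simp [pvGroups, pvVals]
  | cons x t ih =>
    cases h : pvGroups t with
    | nil =>
      have : pvGroups (x :: t) = [(x, 1)] := by simp only [pvGroups]; rw [h]
      rw [this]
      rw [h] at ih
      simp [pvVals] at ih ⊢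
      exact ih
    | cons g rest =>
      obtain ⟨v, c⟩ := g
      rw [h] at ih
      by_cases hv : v = x
      · rw [pvGroups_cons_eq x t v c rest h, if_pos hv]
        subst hv
        rw [← ih]
        simp [pvVals, List.replicate_succ]
      · rw [pvGroups_cons_eq x t v c rest h, if_neg hv]
        rw [← ih]
        simp [pvVals]

lemma pvGroups_fst_lt (s : List String) (hs : s.Pairwise (· ≤ ·)) :
    ((pvGroups s).map Prod.fst).Pairwise (· < ·) := by
  induction s with
  | nil => simp [pvGroups]
  | cons x t ih =>
    rw [List.pairwise_cons] at hs
    obtain ⟨hx, ht⟩ := hs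
    have IH := ih ht
    cases t with
    | nil => simp [pvGroups]
    | cons y t' =>
      obtain ⟨c, rest, hg⟩ := pvGroups_head y t'
      rw [hg] at IH
      by_cases hv : y = x
      · subst hv
        rw [pvGroups_cons_eq y (y :: t') y c rest hg, if_pos rfl]
        rw [List.map_cons, List.pairwise_cons] at IH ⊢
        exact IH
      · rw [pvGroups_cons_eq x (y :: t') y c rest hg, if_neg hv]
        have hxy : x < y := lt_of_le_of_ne (hx y (by simp)) (fun h => hv h.symm)
        rw [List.map_cons, List.pairwise_cons]
        refine ⟨?_, IH⟩
        intro w hw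
        rw [List.map_cons] at IH hw
        rw [List.pairwise_cons] at IH
        rcases List.mem_cons.mp hw with hw | hw
        · simpa [hw] using hxy
        · exact lt_trans hxy (IH.1 w hw)

lemma pvMem_vals_fst {w : String} {gs : List (String × Nat)} (h : w ∈ pvVals gs) :
    w ∈ gs.map Prod.fst := by
  simp only [pvVals, List.mem_flatMap] at h
  obtain ⟨g, hg, hw⟩ := h
  rw [List.eq_of_mem_replicate hw]
  exact List.mem_map_of_mem hg

lemma pvBlock_eq_map (v : String) (gs : List (String × Nat)) :
    (pvVals gs).map (fun y => [v, y]) = pvBlock v gs := by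
  simp [pvVals, pvBlock, List.map_flatMap, List.map_replicate]

lemma pvF_eq_expand (s : List String) (hs : s.Pairwise (· ≤ ·)) :
    pvF s = pvExpand (pvGroups s) := by
  induction s with
  | nil => simp [pvF, pvGroups, pvExpand]
  | cons x t ih =>
    rw [List.pairwise_cons] at hs
    obtain ⟨hx, ht⟩ := hs
    have IH := ih ht
    cases t with
    | nil => simp [pvF, pvGroups, pvExpand, pvBlock]
    | cons y t' =>
      obtain ⟨c, rest, hg⟩ := pvGroups_head y t'
      have hvals : pvVals ((y, c) :: rest) = y :: t' := by rw [← hg]; exact pvVals_groups _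
      rw [hg] at IH
      by_cases hv : y = x
      · -- x equals the head of t: merged into the first group
        subst hv
        have hlt := pvGroups_fst_lt (y :: t') ht
        rw [hg, List.map_cons, List.pairwise_cons] at hlt
        have hne : ∀ z ∈ pvVals rest, ¬ ((y == z) = true) := by
          intro z hz
          have hm : z ∈ rest.map Prod.fst := pvMem_vals_fst hz
          have := hlt.1 z hm
          simp only [beq_iff_eq]
          exact fun hcontra => absurd hcontra (ne_of_lt this)
        have hdecomp : y :: t' = List.replicate c y ++ pvVals rest := by
          rw [← hvals]; simp [pvVals]
        have hfilter : (y :: t').filter (fun z => !(y == z)) = pvVals rest := by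
          rw [hdecomp, List.filter_append]
          have h1 : (List.replicate c y).filter (fun z => !(y == z)) = [] := by simp
          have h2 : (pvVals rest).filter (fun z => !(y == z)) = pvVals rest :=
            List.filter_eq_self.mpr (by intro z hz; simpa using hne z hz)
          rw [h1, h2, List.nil_append]
        rw [pvGroups_cons_eq y (y :: t') y c rest hg, if_pos rfl]
        show (((y :: t').filter (fun z => !(y == z))).map (fun z => [y, z])) ++ pvF (y :: t')
            = pvExpand ((y, c + 1) :: rest)
        rw [hfilter, pvBlock_eq_map, IH]
        show pvBlock y rest ++ ((List.replicate c (pvBlock y rest)).flatten ++ pvExpand rest)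
            = (List.replicate (c + 1) (pvBlock y rest)).flatten ++ pvExpand rest
        simp [List.replicate_succ, List.append_assoc]
      · -- x is strictly below every element of t: a fresh singleton group
        have hxne : ∀ z ∈ y :: t', ¬ ((x == z) = true) := by
          intro z hz
          simp only [beq_iff_eq]
          intro hzx
          subst hzx
          rcases List.mem_cons.mp hz with h' | h'
          · exact hv h'.symm
          · rw [List.pairwise_cons] at ht
            exact hv (le_antisymm (hx y (by simp)) (ht.1 x h')).symm
        have hfilter : (y :: t').filter (fun z => !(x == z)) = y :: t' :=
          List.filter_eq_self.mpr (by intro z hz; simpa using hxne z hz)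
        rw [pvGroups_cons_eq x (y :: t') y c rest hg, if_neg hv]
        show (((y :: t').filter (fun z => !(x == z))).map (fun z => [x, z])) ++ pvF (y :: t')
            = pvExpand ((x, 1) :: (y, c) :: rest)
        rw [hfilter, IH, ← hvals, pvBlock_eq_map]
        show pvBlock x ((y, c) :: rest) ++ pvExpand ((y, c) :: rest)
            = pvExpand ((x, 1) :: (y, c) :: rest)
        simp [pvExpand]

-- ===== VERDICT (by name: the statement is the Claim_ definition above) =====
theorem generate_child_spec : Claim_equal_generate_child := by
  intro l _
  unfold Spec_generate_child generate_child generate_child_alt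
  rw [pvA_eq_pvF, pvGroupsB_eq]
  exact pvF_eq_expand _ (by simpa using PySem.List.sorted_pairwise l (fun x => x))
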